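-- pv_equiv track=rewrite | github.com/simmarum/AdventOfCode | 2016/day-02/main.py | part_2
-- ===== SOURCE A (Python) =====
-- def part_2(inp):
--     keypad = (
--         ('x', 'x', 'x', 'x', 'x', 'x', 'x'),
--         ('x', 'x', 'x', '1', 'x', 'x', 'x'),
--         ('x', 'x', '2', '3', '4', 'x', 'x'),
--         ('x', '5', '6', '7', '8', '9', 'x'),
--         ('x', 'x', 'A', 'B', 'C', 'x', 'x'),
--         ('x', 'x', 'x', 'D', 'x', 'x', 'x'),
--         ('x', 'x', 'x', 'x', 'x', 'x', 'x'),
--     )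
--     position = [3, 1]
--     code = ''
--     for line in inp:
--         for c in line:
--             move = [0, 0]
--             if c == 'U':
--                 move = [-1, 0]
--             if c == 'D':
--                 move = [1, 0]
--             if c == 'L':
--                 move = [0, -1]
--             if c == 'R':
--                 move = [0, 1]
--             if keypad[position[0] + move[0]][position[1] + move[1]] != 'x':
--                 position = [position[0] + move[0], position[1] + move[1]]
--         code += str(keypad[position[0]][position[1]])
--     return code
-- ===== SOURCE B (Python) =====
-- # Keypad as an adjacency dict: key label -> {direction: neighbor}; missing
-- # direction (blocked move or non-direction char) keeps the current key.
-- _ADJ = {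
--     '1': {'D': '3'},
--     '2': {'R': '3', 'D': '6'},
--     '3': {'U': '1', 'L': '2', 'R': '4', 'D': '7'},
--     '4': {'L': '3', 'D': '8'},
--     '5': {'R': '6'},
--     '6': {'L': '5', 'U': '2', 'R': '7', 'D': 'A'},
--     '7': {'L': '6', 'U': '3', 'R': '8', 'D': 'B'},
--     '8': {'L': '7', 'U': '4', 'R': '9', 'D': 'C'},
--     '9': {'L': '8'},
--     'A': {'U': '6', 'R': 'B'},
--     'B': {'L': 'A', 'U': '7', 'R': 'C', 'D': 'D'},
--     'C': {'L': 'B', 'U': '8'},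
--     'D': {'U': 'B'},
-- }
--
-- def part_2(inp):
--     pos = '5'
--     code = []
--     for line in inp:
--         for c in line:
--             pos = _ADJ[pos].get(c, pos)
--         code.append(pos)
--     return ''.join(code)
-- ===== Notes on version B (the rewrite author's own statement) =====
-- stated objective: idiomatic
-- what changed: Replaces the 7x7 sentinel-bordered coordinate grid and per-character move-vector arithmetic by a precomputed adjacency table from key label to direction->neighbor, so the state is just the key label and each step is one dict lookup with the key itself as default.
import Mathlib
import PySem

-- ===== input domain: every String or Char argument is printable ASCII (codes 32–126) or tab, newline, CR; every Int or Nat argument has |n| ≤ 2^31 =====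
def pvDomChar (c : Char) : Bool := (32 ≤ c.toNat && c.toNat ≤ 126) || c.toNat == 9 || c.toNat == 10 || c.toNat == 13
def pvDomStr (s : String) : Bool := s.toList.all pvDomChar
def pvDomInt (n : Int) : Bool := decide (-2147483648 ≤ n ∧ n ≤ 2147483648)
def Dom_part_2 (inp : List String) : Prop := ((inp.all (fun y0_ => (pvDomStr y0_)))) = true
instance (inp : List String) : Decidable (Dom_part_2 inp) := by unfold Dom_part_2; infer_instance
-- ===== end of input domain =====

-- B replaces A's coordinate grid + sentinel border by an adjacency table on key labels (idiomatic/alternative; return value only).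

-- ===== PORT A =====
-- A's 7×7 tuple-of-tuples keypad; indexing uses pyGetD, exact here because every
-- index A ever forms lies in 0..6 (the position stays on a key, moves are ±1, and
-- the grid has an 'x' border), so Python's tuple indexing never raises.
def keypadA : List (List Char) :=
  [ ['x','x','x','x','x','x','x'],
    ['x','x','x','1','x','x','x'],
    ['x','x','2','3','4','x','x'],
    ['x','5','6','7','8','9','x'],
    ['x','x','A','B','C','x','x'],
    ['x','x','x','D','x','x','x'],
    ['x','x','x','x','x','x','x'] ]

def kget (i j : Int) : Char :=
  PySem.List.pyGetD (PySem.List.pyGetD keypadA i []) j 'x'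

-- the body of A's inner loop, step for step (sequential if-reassignments of move)
def stepA (p : Int × Int) (c : Char) : Int × Int :=
  let m0 : Int × Int := (0, 0)
  let m1 := if c = 'U' then ((-1 : Int), (0 : Int)) else m0
  let m2 := if c = 'D' then ((1 : Int), (0 : Int)) else m1
  let m3 := if c = 'L' then ((0 : Int), (-1 : Int)) else m2
  let m  := if c = 'R' then ((0 : Int), (1 : Int)) else m3
  if kget (p.1 + m.1) (p.2 + m.2) ≠ 'x' then (p.1 + m.1, p.2 + m.2) else p

def part_2 (inp : List String) : String :=
  (inp.foldl
    (fun st line =>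
      let pos := line.toList.foldl stepA st.1
      (pos, st.2 ++ String.singleton (kget pos.1 pos.2)))
    (((3 : Int), (1 : Int)), "")).2

-- ===== PORT B =====
-- B's adjacency dict: key label -> assoc list direction -> neighbor
def adjB : PySem.Dict Char (PySem.Dict Char Char) :=
  PySem.Dict.mk
  [ ('1', PySem.Dict.mk [('D','3')]),
    ('2', PySem.Dict.mk [('R','3'), ('D','6')]),
    ('3', PySem.Dict.mk [('U','1'), ('L','2'), ('R','4'), ('D','7')]),
    ('4', PySem.Dict.mk [('L','3'), ('D','8')]),
    ('5', PySem.Dict.mk [('R','6')]),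
    ('6', PySem.Dict.mk [('L','5'), ('U','2'), ('R','7'), ('D','A')]),
    ('7', PySem.Dict.mk [('L','6'), ('U','3'), ('R','8'), ('D','B')]),
    ('8', PySem.Dict.mk [('L','7'), ('U','4'), ('R','9'), ('D','C')]),
    ('9', PySem.Dict.mk [('L','8')]),
    ('A', PySem.Dict.mk [('U','6'), ('R','B')]),
    ('B', PySem.Dict.mk [('L','A'), ('U','7'), ('R','C'), ('D','D')]),
    ('C', PySem.Dict.mk [('L','B'), ('U','8')]),
    ('D', PySem.Dict.mk [('U','B')]) ]

-- pos = _ADJ[pos].get(c, pos)   (_ADJ[pos] never raises: pos is always a key label)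
def stepB (pos : Char) (c : Char) : Char :=
  PySem.Dict.getD ((PySem.Dict.get? adjB pos).getD PySem.Dict.empty) c pos

def part_2_alt (inp : List String) : String :=
  String.ofList
    (inp.foldl
      (fun st line =>
        let pos := line.toList.foldl stepB st.1
        (pos, st.2 ++ [pos]))
      ('5', ([] : List Char))).2

-- ===== PRECONDITION & SPEC =====
def Spec_part_2 (inp : List String) (out : String) : Prop := out = part_2_alt inp
instance (inp : List String) (out : String) : Decidable (Spec_part_2 inp out) := by unfold Spec_part_2; infer_instance

-- ===== CLAIM (what is proved, stated in full; the proofs are below) =====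
def Claim_equal_part_2 : Prop := ∀ (inp : List String), Dom_part_2 inp → Spec_part_2 inp (part_2 inp)

-- ===== LEMMAS AND PROOFS =====
def pvKeys : List Char := ['1','2','3','4','5','6','7','8','9','A','B','C','D']

def pvCoords (k : Char) : Int × Int :=
  if k = '1' then (1,3) else
  if k = '2' then (2,2) else if k = '3' then (2,3) else if k = '4' then (2,4) else
  if k = '5' then (3,1) else if k = '6' then (3,2) else if k = '7' then (3,3) else
  if k = '8' then (3,4) else if k = '9' then (3,5) else
  if k = 'A' then (4,2) else if k = 'B' then (4,3) else if k = 'C' then (4,4) else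
  (5,3)

theorem pvLabel (k : Char) (hk : k ∈ pvKeys) :
    kget (pvCoords k).1 (pvCoords k).2 = k := by
  fin_cases hk <;> decide

theorem pvStep (k : Char) (hk : k ∈ pvKeys) (c : Char) :
    stepA (pvCoords k) c = pvCoords (stepB k c) ∧ stepB k c ∈ pvKeys := by
  by_cases hU : c = 'U'
  · subst hU; fin_cases hk <;> exact ⟨by decide, by decide⟩
  by_cases hD : c = 'D'
  · subst hD; fin_cases hk <;> exact ⟨by decide, by decide⟩
  by_cases hL : c = 'L'
  · subst hL; fin_cases hk <;> exact ⟨by decide, by decide⟩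
  by_cases hR : c = 'R'
  · subst hR; fin_cases hk <;> exact ⟨by decide, by decide⟩
  · have eU : ('U' == c) = false := beq_eq_false_iff_ne.mpr (Ne.symm hU)
    have eD : ('D' == c) = false := beq_eq_false_iff_ne.mpr (Ne.symm hD)
    have eL : ('L' == c) = false := beq_eq_false_iff_ne.mpr (Ne.symm hL)
    have eR : ('R' == c) = false := beq_eq_false_iff_ne.mpr (Ne.symm hR)
    fin_cases hk <;>
      simp [stepA, stepB, hU, hD, hL, hR, eU, eD, eL, eR, adjB,
            PySem.Dict.getD, PySem.Dict.get?, PySem.Dict.empty,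
            List.find?, pvCoords, kget, pvKeys]

theorem pvInner (cs : List Char) (k : Char) (hk : k ∈ pvKeys) :
    cs.foldl stepA (pvCoords k) = pvCoords (cs.foldl stepB k) ∧
      cs.foldl stepB k ∈ pvKeys := by
  induction cs generalizing k with
  | nil => exact ⟨rfl, hk⟩
  | cons c cs ih =>
    obtain ⟨h1, h2⟩ := pvStep k hk c
    simpa [List.foldl, h1] using ih (stepB k c) h2

theorem pvOuter (inp : List String) (k : Char) (hk : k ∈ pvKeys)
    (sA : String) (sB : List Char) (hs : sA = String.ofList sB) :
    (inp.foldl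
      (fun st line =>
        let pos := line.toList.foldl stepA st.1
        (pos, st.2 ++ String.singleton (kget pos.1 pos.2)))
      ((pvCoords k), sA)).2 =
    String.ofList
      ((inp.foldl
        (fun st line =>
          let pos := line.toList.foldl stepB st.1
          (pos, st.2 ++ [pos]))
        (k, sB)).2) := by
  induction inp generalizing k sA sB with
  | nil => simpa using hs
  | cons line rest ih =>
    obtain ⟨h1, h2⟩ := pvInner line.toList k hk
    simp only [List.foldl, h1]
    refine ih _ h2 _ _ ?_
    rw [hs, pvLabel _ h2]
    have hsing : String.singleton (List.foldl stepB k line.toList) =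
        String.ofList [List.foldl stepB k line.toList] := by
      simp [String.singleton, String.push, String.ofList]
    rw [hsing, ← String.ofList_append]

-- ===== VERDICT (by name: the statement is the Claim_ definition above) =====
theorem part_2_spec : Claim_equal_part_2 := by
  intro inp _
  unfold Spec_part_2 part_2 part_2_alt
  have h5 : ('5' : Char) ∈ pvKeys := by decide
  simpa using pvOuter inp '5' h5 "" [] rfl
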